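-- pv_equiv track=rewrite | github.com/Tingji2419/META-ID | src/ID-score-plot.py | find_specific_user_item_subsets
-- ===== SOURCE A (Python) =====
-- def find_specific_user_item_subsets(rating_dict, target_items=[]):
--     # Check each combination to find a valid subset
--     valid_subsets = []
--     for user, items in rating_dict.items():
--         flag = 1
--         for i in target_items:
--             if i not in items.keys():
--                 flag = 0
--                 break
--         if flag == 1:
--             valid_subsets.append(user)
--
--     # Return all found subsets or indicate none found
--     return valid_subsets
-- ===== SOURCE B (Python) =====
-- def find_specific_user_item_subsets(rating_dict, target_items=[]):
--     # Intersection-style reduction: start from all (user, items) pairs and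
--     # let each target item shrink the survivor list.
--     candidates = list(rating_dict.items())
--     for i in target_items:
--         candidates = [(u, its) for (u, its) in candidates if i in its]
--     return [u for (u, _) in candidates]
-- ===== Notes on version B (the rewrite author's own statement) =====
-- stated objective: alternative
-- what changed: Swapped the loop nesting: instead of checking every target item per user, B iterates over target items and shrinks a surviving candidate list, mapping out the user names at the end.
import Mathlib
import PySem

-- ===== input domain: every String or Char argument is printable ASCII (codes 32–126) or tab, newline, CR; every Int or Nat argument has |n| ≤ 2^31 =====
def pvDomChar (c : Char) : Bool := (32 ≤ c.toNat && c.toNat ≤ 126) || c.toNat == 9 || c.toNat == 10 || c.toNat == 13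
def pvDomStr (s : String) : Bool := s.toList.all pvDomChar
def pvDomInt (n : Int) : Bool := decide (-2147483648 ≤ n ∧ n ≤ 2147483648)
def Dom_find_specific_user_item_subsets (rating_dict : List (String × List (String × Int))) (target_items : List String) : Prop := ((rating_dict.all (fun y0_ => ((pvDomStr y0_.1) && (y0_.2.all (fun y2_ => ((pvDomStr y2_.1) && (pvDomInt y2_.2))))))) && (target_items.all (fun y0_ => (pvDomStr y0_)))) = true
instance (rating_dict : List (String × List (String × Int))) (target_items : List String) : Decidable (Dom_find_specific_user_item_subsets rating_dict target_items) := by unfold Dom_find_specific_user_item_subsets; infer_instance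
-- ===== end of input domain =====

-- B restructures A: target items become the outer loop, shrinking a surviving candidate list (alternative decomposition, same cost).


-- ===== PORT A =====
def pvAInner (target_items : List String) (items : List (String × Int)) : Int :=
  match target_items with
  | [] => 1
  | i :: rest =>
      if (items.map Prod.fst).contains i = false then 0   -- 'if i not in items.keys(): flag = 0; break'
      else pvAInner rest items

def find_specific_user_item_subsets (rating_dict : List (String × List (String × Int))) (target_items : List String) : List String :=
  rating_dict.foldl (fun valid_subsets p =>
    if pvAInner target_items p.2 = 1 then valid_subsets ++ [p.1] else valid_subsets) []


-- ===== PORT B =====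
def pvBLoop (target_items : List String) (candidates : List (String × List (String × Int))) : List (String × List (String × Int)) :=
  match target_items with
  | [] => candidates
  | i :: rest => pvBLoop rest (candidates.filter (fun p => (p.2.map Prod.fst).contains i))

def find_specific_user_item_subsets_alt (rating_dict : List (String × List (String × Int))) (target_items : List String) : List String :=
  (pvBLoop target_items rating_dict).map (fun p => p.1)


-- ===== PRECONDITION & SPEC =====
def Spec_find_specific_user_item_subsets (rating_dict : List (String × List (String × Int))) (target_items : List String) (out : List String) : Prop := out = find_specific_user_item_subsets_alt rating_dict target_items
instance (rating_dict : List (String × List (String × Int))) (target_items : List String) (out : List String) : Decidable (Spec_find_specific_user_item_subsets rating_dict target_items out) := by unfold Spec_find_specific_user_item_subsets; infer_instance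

-- ===== CLAIM (what is proved, stated in full; the proofs are below) =====
def Claim_equal_find_specific_user_item_subsets : Prop := ∀ (rating_dict : List (String × List (String × Int))) (target_items : List String), Dom_find_specific_user_item_subsets rating_dict target_items → Spec_find_specific_user_item_subsets rating_dict target_items (find_specific_user_item_subsets rating_dict target_items)

-- ===== LEMMAS AND PROOFS =====



theorem pvAInner_eq_one_iff (ti : List String) (items : List (String × Int)) :
    (pvAInner ti items = 1) ↔ (ti.all (fun i => (items.map Prod.fst).contains i) = true) := by
  induction ti with
  | nil => simp [pvAInner]
  | cons i rest ih =>
      cases hc : (items.map Prod.fst).contains i with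
      | false =>
          simp only [pvAInner, hc, List.all_cons, Bool.false_and]
          simp
      | true =>
          simp only [pvAInner, hc, List.all_cons, Bool.true_and]
          simp only [show (true = false) = False by simp, if_false]
          exact ih

theorem pvBLoop_eq_filter (ti : List String) (cands : List (String × List (String × Int))) :
    pvBLoop ti cands = cands.filter (fun p => ti.all (fun i => (p.2.map Prod.fst).contains i)) := by
  induction ti generalizing cands with
  | nil => simp [pvBLoop]
  | cons i rest ih =>
      simp only [pvBLoop, ih, List.filter_filter, List.all_cons]
      congr 1
      funext p
      rw [Bool.and_comm]

theorem pvFoldlA (ti : List String) (rd : List (String × List (String × Int))) (acc : List String) :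
    rd.foldl (fun valid_subsets p =>
      if pvAInner ti p.2 = 1 then valid_subsets ++ [p.1] else valid_subsets) acc
    = acc ++ (rd.filter (fun p => ti.all (fun i => (p.2.map Prod.fst).contains i))).map (fun p => p.1) := by
  induction rd generalizing acc with
  | nil => simp
  | cons q rest ih =>
      simp only [List.foldl_cons, List.filter_cons]
      by_cases h : pvAInner ti q.2 = 1
      · have hb : (ti.all (fun i => (q.2.map Prod.fst).contains i)) = true := (pvAInner_eq_one_iff ti q.2).mp h
        rw [if_pos h, if_pos hb, ih]
        simp
      · have hb : ¬ (ti.all (fun i => (q.2.map Prod.fst).contains i)) = true :=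
          fun hc => h ((pvAInner_eq_one_iff ti q.2).mpr hc)
        rw [if_neg h, if_neg hb, ih]

-- ===== VERDICT =====
theorem find_specific_user_item_subsets_spec : Claim_equal_find_specific_user_item_subsets := by
  intro rd ti _
  unfold Spec_find_specific_user_item_subsets find_specific_user_item_subsets find_specific_user_item_subsets_alt
  rw [pvFoldlA, pvBLoop_eq_filter]
  simp
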